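-- pv_equiv track=rewrite | github.com/OpenBMB/MiniCPM-V | eval_mm/vlmevalkit/vlmeval/dataset/utils/ccocr_evaluator/ocr_evaluator.py | evaluate_single_sample
-- ===== SOURCE A (Python) =====
-- from collections import Counter
--
-- def evaluate_single_sample(gts, preds):
--     right_num = 0
--     gt_counter_info = dict(Counter(gts))
--     pdt_counter_info = dict(Counter(preds))
--     for gt_token, gt_count in gt_counter_info.items():
--         pred_count = pdt_counter_info.get(gt_token, 0)
--         right_num += min(gt_count, pred_count)
--     return right_num
-- ===== SOURCE B (Python) =====
-- from collections import Counter
--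
-- def evaluate_single_sample(gts, preds):
--     budget = Counter(gts)
--     right_num = 0
--     for token in preds:
--         if budget[token] > 0:
--             right_num += 1
--             budget[token] -= 1
--     return right_num
-- ===== Notes on version B (the rewrite author's own statement) =====
-- stated objective: simpler
-- what changed: Instead of building two Counters and summing min(gt_count, pred_count) over the gt keys, B builds one consumable budget Counter from gts and scans preds once, counting a token whenever its remaining budget is positive and decrementing it.
import Mathlib
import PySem

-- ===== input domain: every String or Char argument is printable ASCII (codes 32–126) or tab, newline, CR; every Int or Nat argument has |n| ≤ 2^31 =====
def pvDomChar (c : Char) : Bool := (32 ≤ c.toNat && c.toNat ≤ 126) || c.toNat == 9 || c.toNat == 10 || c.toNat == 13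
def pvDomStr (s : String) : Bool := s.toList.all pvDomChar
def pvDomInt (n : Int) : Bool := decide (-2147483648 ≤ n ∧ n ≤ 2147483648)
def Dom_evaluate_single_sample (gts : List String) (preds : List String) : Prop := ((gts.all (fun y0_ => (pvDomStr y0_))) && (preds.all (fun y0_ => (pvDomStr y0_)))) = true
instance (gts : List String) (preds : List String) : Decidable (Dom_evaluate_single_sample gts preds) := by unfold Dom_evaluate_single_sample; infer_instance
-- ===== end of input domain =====

-- B keeps one consumable budget Counter built from gts and scans preds once, instead of
-- building two Counters and summing min(gt_count, pred_count) over the gt keys (objective: simpler).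

-- ===== PORT A =====
def evaluate_single_sample (gts : List String) (preds : List String) : Int :=
  let gt_counter_info := PySem.Dict.counter gts
  let pdt_counter_info := PySem.Dict.counter preds
  gt_counter_info.items.foldl
    (fun right_num p => right_num + min p.2 (pdt_counter_info.getD p.1 0)) 0

-- ===== PORT B =====
-- the 'for token in preds' loop of Source B, carrying (budget, right_num)
def pvBLoop : PySem.Dict String Int → Int → List String → Int
  | _, right_num, [] => right_num
  | budget, right_num, token :: rest =>
    if budget.getD token 0 > 0 then
      pvBLoop (budget.insert token (budget.getD token 0 - 1)) (right_num + 1) rest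
    else
      pvBLoop budget right_num rest

def evaluate_single_sample_alt (gts : List String) (preds : List String) : Int :=
  pvBLoop (PySem.Dict.counter gts) 0 preds

-- ===== PRECONDITION & SPEC =====
def Spec_evaluate_single_sample (gts : List String) (preds : List String) (out : Int) : Prop := out = evaluate_single_sample_alt gts preds
instance (gts : List String) (preds : List String) (out : Int) : Decidable (Spec_evaluate_single_sample gts preds out) := by unfold Spec_evaluate_single_sample; infer_instance

-- ===== CLAIM (what is proved, stated in full; the proofs are below) =====
def Claim_equal_evaluate_single_sample : Prop := ∀ (gts : List String) (preds : List String), Dom_evaluate_single_sample gts preds → Spec_evaluate_single_sample gts preds (evaluate_single_sample gts preds)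

-- ===== LEMMAS AND PROOFS =====

-- foldl with '+ g x' is the sum of the mapped list
theorem pv_foldl_add_sum {α : Type} (g : α → Int) :
    ∀ (l : List α) (a : Int), l.foldl (fun s x => s + g x) a = a + (l.map g).sum := by
  intro l
  induction l with
  | nil => intro a; simp
  | cons x xs ih => intro a; simp [List.foldl_cons, ih]; ring

-- sum over a nodup list when exactly one element's value drops by one
theorem pv_sum_drop_one (t : String) (f h : String → Int)
    (hne : ∀ k, k ≠ t → f k = h k) (heq : f t = h t + 1) :
    ∀ (L : List String), L.Nodup → t ∈ L → (L.map f).sum = 1 + (L.map h).sum := by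
  intro L
  induction L with
  | nil => intro _ hmem; simp at hmem
  | cons a L' ih =>
    intro hnd hmem
    rcases List.nodup_cons.mp hnd with ⟨hanot, hnd'⟩
    by_cases hat : a = t
    · subst hat
      have : (L'.map f) = (L'.map h) := by
        apply List.map_congr_left
        intro k hk
        exact hne k (fun hkt => hanot (hkt ▸ hk))
      simp [this, heq]; ring
    · have htL' : t ∈ L' := by
        rcases List.mem_cons.mp hmem with h1 | h2
        · exact absurd h1.symm hat
        · exact h2
      simp [hne a hat, ih hnd' htL']
      ring

-- the B loop computes Σ_{k ∈ L} min(budget k, count preds k) for any nodup L covering preds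
theorem pvBLoop_sum :
    ∀ (preds : List String) (c : PySem.Dict String Int) (acc : Int) (L : List String),
      L.Nodup → (∀ x ∈ preds, x ∈ L) → (∀ k, 0 ≤ c.getD k 0) →
      pvBLoop c acc preds
        = acc + (L.map (fun k => min (c.getD k 0) ((preds.count k : Int)))).sum := by
  intro preds
  induction preds with
  | nil =>
    intro c acc L _ _ hpos
    rw [pvBLoop]
    have hzero : (L.map (fun k => min (c.getD k 0) (((([] : List String)).count k : Int)))).sum = 0 := by
      apply List.sum_eq_zero
      intro x hx
      rcases List.mem_map.mp hx with ⟨k, _, hk⟩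
      have hp := hpos k
      simp only [List.count_nil, Int.natCast_zero] at hk
      omega
    rw [hzero]
    ring
  | cons t rest ih =>
    intro c acc L hnd hcov hpos
    by_cases hpt : c.getD t 0 > 0
    · have hpos' : ∀ k, 0 ≤ (c.insert t (c.getD t 0 - 1)).getD k 0 := by
        intro k
        rw [PySem.Dict.getD_insert]
        split_ifs with hk
        · subst hk; omega
        · exact hpos k
      rw [pvBLoop, if_pos hpt,
        ih (c.insert t (c.getD t 0 - 1)) (acc + 1) L hnd
          (fun x hx => hcov x (List.mem_cons_of_mem _ hx)) hpos']
      have hne : ∀ k, k ≠ t →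
          min (c.getD k 0) (((t :: rest).count k : Int))
            = min ((c.insert t (c.getD t 0 - 1)).getD k 0) ((rest.count k : Int)) := by
        intro k hk
        rw [PySem.Dict.getD_insert, if_neg hk, List.count_cons,
          if_neg (fun h => hk ((beq_iff_eq.mp h).symm))]
        simp
      have heq :
          min (c.getD t 0) (((t :: rest).count t : Int))
            = min ((c.insert t (c.getD t 0 - 1)).getD t 0) ((rest.count t : Int)) + 1 := by
        rw [PySem.Dict.getD_insert, if_pos rfl, List.count_cons_self]
        push_cast
        omega
      have hsum :
          (L.map (fun k => min (c.getD k 0) (((t :: rest).count k : Int)))).sum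
            = 1 + (L.map (fun k =>
                min ((c.insert t (c.getD t 0 - 1)).getD k 0) ((rest.count k : Int)))).sum :=
        pv_sum_drop_one t _ _ hne heq L hnd (hcov t List.mem_cons_self)
      rw [hsum]; ring
    · have hz : c.getD t 0 = 0 := le_antisymm (by omega) (hpos t)
      rw [pvBLoop, if_neg hpt,
        ih c acc L hnd (fun x hx => hcov x (List.mem_cons_of_mem _ hx)) hpos]
      have hmap : (L.map (fun k => min (c.getD k 0) (((t :: rest).count k : Int))))
          = (L.map (fun k => min (c.getD k 0) ((rest.count k : Int)))) := by
        apply List.map_congr_left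
        intro k _
        by_cases hkt : k = t
        · subst hkt
          rw [hz, min_eq_left (Int.natCast_nonneg _), min_eq_left (Int.natCast_nonneg _)]
        · rw [List.count_cons, if_neg (fun h => hkt ((beq_iff_eq.mp h).symm))]
          simp
      rw [hmap]

-- A as a sum over the distinct gt tokens
theorem pv_A_sum (gts preds : List String) :
    evaluate_single_sample gts preds
      = ((PySem.List.dedup gts).map
          (fun k => min ((gts.count k : Int)) ((preds.count k : Int)))).sum := by
  simp only [evaluate_single_sample, PySem.Dict.items_counter, List.foldl_map]
  rw [pv_foldl_add_sum]
  simp [PySem.Dict.getD_counter]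

-- B as a sum over the distinct pred tokens
theorem pv_B_sum (gts preds : List String) :
    evaluate_single_sample_alt gts preds
      = ((PySem.List.dedup preds).map
          (fun k => min ((gts.count k : Int)) ((preds.count k : Int)))).sum := by
  unfold evaluate_single_sample_alt
  rw [pvBLoop_sum preds (PySem.Dict.counter gts) 0 (PySem.List.dedup preds)
        (PySem.List.nodup_dedup preds)
        (fun x hx => (PySem.List.mem_dedup _ _).mpr hx)
        (by intro k; rw [PySem.Dict.getD_counter]; positivity)]
  simp [PySem.Dict.getD_counter]

-- a sum of a function vanishing off the common support over either nodup index list is the same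
theorem pv_sum_switch (g : String → Int) (L M : List String)
    (hL : L.Nodup) (hM : M.Nodup)
    (h1 : ∀ k ∈ L, k ∉ M → g k = 0) (h2 : ∀ k ∈ M, k ∉ L → g k = 0) :
    (L.map g).sum = (M.map g).sum := by
  classical
  rw [← List.sum_toFinset g hL, ← List.sum_toFinset g hM]
  have e1 : ∑ x ∈ L.toFinset ∩ M.toFinset, g x = ∑ x ∈ L.toFinset, g x := by
    apply Finset.sum_subset Finset.inter_subset_left
    intro x hx hnx
    exact h1 x (List.mem_toFinset.mp hx)
      (fun hxM => hnx (Finset.mem_inter.mpr ⟨hx, List.mem_toFinset.mpr hxM⟩))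
  have e2 : ∑ x ∈ L.toFinset ∩ M.toFinset, g x = ∑ x ∈ M.toFinset, g x := by
    apply Finset.sum_subset Finset.inter_subset_right
    intro x hx hnx
    exact h2 x (List.mem_toFinset.mp hx)
      (fun hxL => hnx (Finset.mem_inter.mpr ⟨List.mem_toFinset.mpr hxL, hx⟩))
  rw [← e1, e2]

-- ===== VERDICT (by name: the statement is the Claim_ definition above) =====
theorem evaluate_single_sample_spec : Claim_equal_evaluate_single_sample := by
  intro gts preds _
  unfold Spec_evaluate_single_sample
  rw [pv_A_sum, pv_B_sum]
  apply pv_sum_switch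
  · exact PySem.List.nodup_dedup gts
  · exact PySem.List.nodup_dedup preds
  · intro k _ hkM
    have : k ∉ preds := fun h => hkM ((PySem.List.mem_dedup _ _).mpr h)
    rw [List.count_eq_zero_of_not_mem this]
    simp
  · intro k _ hkL
    have : k ∉ gts := fun h => hkL ((PySem.List.mem_dedup _ _).mpr h)
    rw [List.count_eq_zero_of_not_mem this]
    simp
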